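-- pv_equiv track=rewrite | github.com/isen-zhang/metalang | pretrain/data/dataset.py | process_streamids_inputs
-- ===== SOURCE A (Python) =====
-- import copy
--
-- def process_streamids_inputs(inputs, mask_prefix=False, pivot=-1):
--     '''
--     Process the inputs for streaming ids dataset. Find -1 in input ids and remove it.
--     Set the labels to -100 before -1.
--     '''
--
--     # Find -1 in input ids and remove it
--     # if -1 in inputs["input_ids"]:
--     #     # Find the position of -1
--     #     pos = inputs["input_ids"].index(-1)
--     #     inputs["input_ids"] = [i for i in inputs["input_ids"] if i != -1]
--     #     inputs["attention_mask"] = [1] * len(inputs["input_ids"])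
--     #     if mask_prefix:
--     #         # mask the labels before -1
--     #         labels = [-100] * pos + inputs["input_ids"][pos:]
--     #         inputs["labels"] = labels
--     #     else:
--     #         inputs["labels"] = copy.deepcopy(inputs["input_ids"])
--
--
--     # Replace -1 with 0
--     if mask_prefix and pivot in inputs['input_ids']:
--         # get position of last pivot
--         last_pos = len(inputs["input_ids"]) - 1 - inputs["input_ids"][::-1].index(pivot) + 1
--         inputs["labels"] = [-100] * last_pos + inputs["input_ids"][last_pos:]
--     else:
--         inputs["labels"] = copy.deepcopy(inputs["input_ids"])
--     inputs["input_ids"] = [49999 if i < 0 else i for i in inputs["input_ids"]]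
--     inputs["attention_mask"] = [1] * len(inputs["input_ids"])
--
--     return inputs
-- ===== SOURCE B (Python) =====
-- def process_streamids_inputs(inputs, mask_prefix=False, pivot=-1):
--     ids = inputs["input_ids"]
--     if mask_prefix:
--         # single backward pass: keep values until the last pivot is met,
--         # then emit -100 for the pivot and everything before it
--         rev = []
--         masking = False
--         for v in reversed(ids):
--             if masking:
--                 rev.append(-100)
--             elif v == pivot:
--                 masking = True
--                 rev.append(-100)
--             else:
--                 rev.append(v)
--         inputs["labels"] = rev[::-1]
--     else:
--         inputs["labels"] = list(ids)
--     inputs["input_ids"] = [49999 if v < 0 else v for v in ids]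
--     inputs["attention_mask"] = [1] * len(ids)
--     return inputs
-- ===== Notes on version B (the rewrite author's own statement) =====
-- stated objective: alternative
-- what changed: A locates the last pivot with a membership test plus a reversed-copy .index and then splices [-100]*last_pos with a slice; B builds the labels in one backward pass that switches to emitting -100 once the pivot is seen, with no index arithmetic or slicing.
import Mathlib
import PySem

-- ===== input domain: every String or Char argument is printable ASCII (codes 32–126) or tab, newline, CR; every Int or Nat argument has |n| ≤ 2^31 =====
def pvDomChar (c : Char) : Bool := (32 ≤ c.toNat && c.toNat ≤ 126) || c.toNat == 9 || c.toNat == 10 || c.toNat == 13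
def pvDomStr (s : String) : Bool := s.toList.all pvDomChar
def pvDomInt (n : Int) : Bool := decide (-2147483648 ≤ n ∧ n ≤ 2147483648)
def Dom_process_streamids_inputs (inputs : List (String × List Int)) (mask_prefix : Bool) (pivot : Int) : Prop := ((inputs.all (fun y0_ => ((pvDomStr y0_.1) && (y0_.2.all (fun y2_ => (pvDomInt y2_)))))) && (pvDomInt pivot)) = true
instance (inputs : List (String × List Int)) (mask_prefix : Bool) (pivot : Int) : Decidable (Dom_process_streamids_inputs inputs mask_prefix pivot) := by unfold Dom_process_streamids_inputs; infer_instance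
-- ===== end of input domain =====

-- B replaces A's membership test + reversed-copy .index + slice splice by a single
-- backward pass that flips to emitting -100 once the pivot is seen.
-- A mutates the dict in place; equality here is about the returned dict's contents.

-- ===== PORT A =====
-- literal transliteration of A; ids[::-1] is List.reverse (PySem.List.slice?_none_none_neg_one)
def process_streamids_inputs (inputs : List (String × List Int)) (mask_prefix : Bool) (pivot : Int) : List (String × List Int) :=
  let d0 := PySem.Dict.mk inputs
  let d1 :=
    if mask_prefix && ((PySem.Dict.getD d0 "input_ids" []).contains pivot) then
      let ids := PySem.Dict.getD d0 "input_ids" []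
      -- list.index on the reversed copy; under the branch condition the pivot is present
      let j := (PySem.List.index? ids.reverse pivot).getD 0
      let last_pos : Int := (ids.length : Int) - 1 - (j : Int) + 1
      PySem.Dict.insert d0 "labels"
        (List.replicate last_pos.toNat (-100) ++ PySem.List.slice ids (some last_pos) none)
    else
      PySem.Dict.insert d0 "labels" (PySem.Dict.getD d0 "input_ids" [])
  let d2 := PySem.Dict.insert d1 "input_ids"
      ((PySem.Dict.getD d1 "input_ids" []).map (fun i => if i < 0 then (49999 : Int) else i))
  let d3 := PySem.Dict.insert d2 "attention_mask"
      (List.replicate (PySem.Dict.getD d2 "input_ids" []).length (1 : Int))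
  d3.items

-- ===== PORT B =====
def pvBStep (pivot : Int) (st : List Int × Bool) (v : Int) : List Int × Bool :=
  if st.2 then (st.1 ++ [(-100 : Int)], true)
  else if v == pivot then (st.1 ++ [(-100 : Int)], true)
  else (st.1 ++ [v], false)

def process_streamids_inputs_alt (inputs : List (String × List Int)) (mask_prefix : Bool) (pivot : Int) : List (String × List Int) :=
  let d0 := PySem.Dict.mk inputs
  let ids := PySem.Dict.getD d0 "input_ids" []
  let labels :=
    if mask_prefix then
      ((ids.reverse.foldl (pvBStep pivot) ([], false)).1).reverse
    else ids
  let d1 := PySem.Dict.insert d0 "labels" labels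
  let d2 := PySem.Dict.insert d1 "input_ids" (ids.map (fun v => if v < 0 then (49999 : Int) else v))
  let d3 := PySem.Dict.insert d2 "attention_mask" (List.replicate ids.length (1 : Int))
  d3.items

-- ===== PRECONDITION & SPEC =====
-- Pre_ excludes exactly the dicts without an "input_ids" key, on which A raises KeyError.
def Pre_process_streamids_inputs (inputs : List (String × List Int)) (mask_prefix : Bool) (pivot : Int) : Prop :=
  "input_ids" ∈ inputs.map Prod.fst
instance (inputs : List (String × List Int)) (mask_prefix : Bool) (pivot : Int) : Decidable (Pre_process_streamids_inputs inputs mask_prefix pivot) := by unfold Pre_process_streamids_inputs; infer_instance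

def pvWitness_process_streamids_inputs : (List (String × List Int)) × Bool × Int :=
  ([("input_ids", [3, -1, 5, -1, 7])], true, -1)

def Spec_process_streamids_inputs (inputs : List (String × List Int)) (mask_prefix : Bool) (pivot : Int) (out : List (String × List Int)) : Prop := out = process_streamids_inputs_alt inputs mask_prefix pivot
instance (inputs : List (String × List Int)) (mask_prefix : Bool) (pivot : Int) (out : List (String × List Int)) : Decidable (Spec_process_streamids_inputs inputs mask_prefix pivot out) := by unfold Spec_process_streamids_inputs; infer_instance

-- ===== CLAIM (what is proved, stated in full; the proofs are below) =====
def Claim_equal_process_streamids_inputs : Prop := ∀ (inputs : List (String × List Int)) (mask_prefix : Bool) (pivot : Int), Dom_process_streamids_inputs inputs mask_prefix pivot → Pre_process_streamids_inputs inputs mask_prefix pivot → Spec_process_streamids_inputs inputs mask_prefix pivot (process_streamids_inputs inputs mask_prefix pivot)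

-- ===== LEMMAS AND PROOFS =====

-- B's fold on a list not containing the pivot copies it
lemma pvFold_no_pivot (pivot : Int) (l acc : List Int) (h : pivot ∉ l) :
    l.foldl (pvBStep pivot) (acc, false) = (acc ++ l, false) := by
  induction l generalizing acc with
  | nil => simp
  | cons x t ih =>
    have hx : x ≠ pivot := by intro hx; exact h (hx ▸ List.mem_cons_self)
    have ht : pivot ∉ t := fun hm => h (List.mem_cons_of_mem _ hm)
    simp [pvBStep, List.foldl_cons, hx, ih (acc ++ [x]) ht]

-- once masking, B's fold emits -100 only
lemma pvFold_masking (pivot : Int) (l acc : List Int) :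
    l.foldl (pvBStep pivot) (acc, true) = (acc ++ List.replicate l.length (-100), true) := by
  induction l generalizing acc with
  | nil => simp
  | cons x t ih =>
    rw [List.foldl_cons, show pvBStep pivot (acc, true) x = (acc ++ [-100], true) from by
      simp [pvBStep], ih (acc ++ [-100])]
    simp [List.replicate_succ]

-- labels agree when the pivot occurs in ids
lemma pvLabels_eq (pivot : Int) (ids : List Int) (h : pivot ∈ ids) :
    List.replicate ((ids.length : Int) - 1 -
        ((PySem.List.index? ids.reverse pivot).getD 0 : Int) + 1).toNat (-100) ++
      PySem.List.slice ids (some ((ids.length : Int) - 1 -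
        ((PySem.List.index? ids.reverse pivot).getD 0 : Int) + 1)) none
    = ((ids.reverse.foldl (pvBStep pivot) ([], false)).1).reverse := by
  have hmem : pivot ∈ ids.reverse := by simpa using h
  obtain ⟨k, hk⟩ := Option.isSome_iff_exists.mp
    ((PySem.List.index?_isSome_iff ids.reverse pivot).mpr hmem)
  obtain ⟨pre, suf, hsplit, hlen, hnot⟩ := (PySem.List.index?_eq_some_iff _ _ _).mp hk
  -- B side
  have hfold : ids.reverse.foldl (pvBStep pivot) ([], false)
      = (pre ++ [-100] ++ List.replicate suf.length (-100), true) := by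
    rw [hsplit, List.foldl_append, pvFold_no_pivot pivot pre [] hnot]
    simp [pvBStep, pvFold_masking]
  have hids : ids = suf.reverse ++ pivot :: pre.reverse := by
    have := congrArg List.reverse hsplit
    simpa using this
  have hlenids : ids.length = pre.length + 1 + suf.length := by
    rw [hids]; simp; omega
  -- A side: last_pos = suf.length + 1
  have hlp : (ids.length : Int) - 1 - ((PySem.List.index? ids.reverse pivot).getD 0 : Int) + 1
      = ((suf.length + 1 : Nat) : Int) := by
    rw [hk]; simp [← hlen]; rw [hlenids]; push_cast; ring
  rw [hlp, PySem.List.slice_from_natCast, Int.toNat_natCast, hfold]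
  rw [hids]
  have hdrop : (suf.reverse ++ pivot :: pre.reverse).drop (suf.length + 1) = pre.reverse := by
    have h1 : suf.length + 1 = suf.reverse.length + 1 := by simp
    rw [h1, List.drop_append]
    simp
  rw [hdrop]
  simp only [List.reverse_append, List.reverse_replicate, List.reverse_cons, List.reverse_nil,
    List.nil_append]
  rw [List.replicate_succ', List.append_assoc]

-- ===== VERDICT (by name: the statement is the Claim_ definition above) =====
theorem process_streamids_inputs_spec : Claim_equal_process_streamids_inputs := by
  intro inputs mask_prefix pivot _ _
  unfold Spec_process_streamids_inputs process_streamids_inputs process_streamids_inputs_alt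
  set d0 := PySem.Dict.mk inputs
  have hgd1 : ∀ L : List Int, (d0.insert "labels" L).getD "input_ids" [] = d0.getD "input_ids" [] := by
    intro L
    rw [PySem.Dict.getD_insert, if_neg (by decide : ("input_ids" : String) ≠ "labels")]
  have hgd2 : ∀ (d : PySem.Dict String (List Int)) (L : List Int),
      (d.insert "input_ids" L).getD "input_ids" [] = L := by
    intro d L
    rw [PySem.Dict.getD_insert, if_pos rfl]
  cases mask_prefix with
  | false =>
    simp only [Bool.false_and, Bool.false_eq_true, if_false, hgd1, hgd2, List.length_map]
  | true =>
    by_cases hmem : pivot ∈ d0.getD "input_ids" []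
    · have hl := pvLabels_eq pivot (d0.getD "input_ids" []) hmem
      simp only [PySem.List.index?_eq_idxOf?] at hl
      simp [hmem, hgd1, hgd2, hl]
    · have hfold := pvFold_no_pivot pivot (d0.getD "input_ids" []).reverse []
        (by simpa using hmem)
      simp [hmem, hgd1, hgd2, hfold]
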